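-- pv_equiv track=rewrite | github.com/magicbadger/python-dabmux | dabmux/utils/charset.py | calculate_label_short_mask
-- ===== SOURCE A (Python) =====
-- def calculate_label_short_mask(label: str, short_label: str) -> int:
--     """
--     Calculate the short label character mask.
--
--     The mask is a 16-bit value where each bit indicates whether the
--     corresponding character in the full label is part of the short label.
--
--     Args:
--         label: Full label (up to 16 characters)
--         short_label: Short label (up to 8 characters)
--
--     Returns:
--         16-bit character mask
--
--     Raises:
--         ValueError: If short label characters are not found in label
--     """
--     if not short_label:
--         return 0
--
--     mask = 0
--     short_idx = 0
--
--     for label_idx, char in enumerate(label):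
--         if label_idx >= 16:
--             break
--
--         if short_idx < len(short_label) and char == short_label[short_idx]:
--             mask |= (1 << (15 - label_idx))
--             short_idx += 1
--
--     # Verify all short label characters were found
--     if short_idx != len(short_label):
--         raise ValueError(
--             f"Short label '{short_label}' characters not found in order in label '{label}'"
--         )
--
--     return mask
-- ===== SOURCE B (Python) =====
-- def calculate_label_short_mask(label: str, short_label: str) -> int:
--     """Idiomatic rewrite: walk the short label with a search cursor instead of
--     scanning the full label with a match pointer."""
--     mask = 0
--     start = 0
--     for sc in short_label:
--         pos = label.find(sc, start)
--         if pos == -1 or pos >= 16: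
--             raise ValueError(
--                 f"Short label '{short_label}' characters not found in order in label '{label}'"
--             )
--         mask |= 1 << (15 - pos)
--         start = pos + 1
--     return mask
-- ===== Notes on version B (the rewrite author's own statement) =====
-- stated objective: idiomatic
-- what changed: B iterates over the short label with a str.find search cursor into the label, instead of A's scan over the label with a match pointer into the short label; Pre_ excludes exactly the inputs where both raise ValueError (short label not an in-order subsequence of the first 16 label characters).
import Mathlib
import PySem

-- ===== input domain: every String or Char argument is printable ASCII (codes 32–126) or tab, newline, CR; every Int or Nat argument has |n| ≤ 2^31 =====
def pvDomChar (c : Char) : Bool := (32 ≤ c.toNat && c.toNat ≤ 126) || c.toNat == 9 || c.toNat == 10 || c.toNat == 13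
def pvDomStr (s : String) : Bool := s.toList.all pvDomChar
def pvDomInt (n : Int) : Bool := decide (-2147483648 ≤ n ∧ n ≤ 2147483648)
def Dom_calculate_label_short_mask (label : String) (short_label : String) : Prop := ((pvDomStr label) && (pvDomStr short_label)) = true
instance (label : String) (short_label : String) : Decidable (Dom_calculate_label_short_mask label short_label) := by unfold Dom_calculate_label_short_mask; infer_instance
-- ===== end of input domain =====

-- B walks the short label with a str.find search cursor instead of A's scan over the label
-- with a match pointer (idiomatic rewrite, same cost); Pre_ excludes exactly the inputs on
-- which BOTH programs raise ValueError.

-- ===== PORT A =====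
-- A's for-loop over enumerate(label) with state (mask, short_idx); break at label_idx >= 16.
def pvLoopA : List Char → Nat → Nat → Nat → List Char → Nat × Nat
  | [], _, mask, si, _ => (mask, si)
  | c :: rest, i, mask, si, sl =>
    if 16 ≤ i then (mask, si)   -- 'if label_idx >= 16: break'
    else if h : si < sl.length then
      if c = sl[si] then pvLoopA rest (i+1) (mask ||| (1 <<< (15 - i))) (si+1) sl
      else pvLoopA rest (i+1) mask si sl
    else pvLoopA rest (i+1) mask si sl

def calculate_label_short_mask (label : String) (short_label : String) : Int :=
  if short_label = "" then 0
  else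
    -- Python raises ValueError when the loop leaves short_idx ≠ len(short_label);
    -- those inputs are outside Pre_, so only the mask component matters here.
    (((pvLoopA label.toList 0 0 0 short_label.toList).1 : Nat) : Int)

-- ===== PORT B =====
-- Source B's for-loop over short_label with state (start, mask); pos = label.find(sc, start).
def pvLoopB (label : String) : List Char → Int → Nat → Nat
  | [], _, mask => mask
  | sc :: rest, start, mask =>
    let pos := PySem.Str.findFrom label (String.ofList [sc]) start none
    if pos = -1 ∨ 16 ≤ pos then mask   -- Source B raises ValueError here; outside Pre_.
    else pvLoopB label rest (pos + 1) (mask ||| (1 <<< (15 - pos.toNat)))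

def calculate_label_short_mask_alt (label : String) (short_label : String) : Int :=
  ((pvLoopB label short_label.toList 0 0 : Nat) : Int)

-- ===== PRECONDITION & SPEC =====
-- Pre_ holds exactly when A (and B) return: the short label must be an in-order
-- subsequence of the first 16 characters of the label; otherwise both raise ValueError.
def Pre_calculate_label_short_mask (label : String) (short_label : String) : Prop :=
  List.Sublist short_label.toList (label.toList.take 16)
instance (label : String) (short_label : String) : Decidable (Pre_calculate_label_short_mask label short_label) := by unfold Pre_calculate_label_short_mask; infer_instance

def pvWitness_calculate_label_short_mask : String × String := ("DAB Ensemble One", "DAB One")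

def Spec_calculate_label_short_mask (label : String) (short_label : String) (out : Int) : Prop := out = calculate_label_short_mask_alt label short_label
instance (label : String) (short_label : String) (out : Int) : Decidable (Spec_calculate_label_short_mask label short_label out) := by unfold Spec_calculate_label_short_mask; infer_instance

-- ===== CLAIM (what is proved, stated in full; the proofs are below) =====
def Claim_equal_calculate_label_short_mask : Prop := ∀ (label : String) (short_label : String), Dom_calculate_label_short_mask label short_label → Pre_calculate_label_short_mask label short_label → Spec_calculate_label_short_mask label short_label (calculate_label_short_mask label short_label)

-- ===== LEMMAS AND PROOFS =====

-- Proof-only view of A's loop: the remaining short-label characters as a list.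
def specLoopA : List Char → Nat → Nat → List Char → Nat
  | [], _, mask, _ => mask
  | c :: rest, i, mask, rem =>
    if 16 ≤ i then mask
    else match rem with
      | [] => specLoopA rest (i+1) mask []
      | sc :: rem' =>
        if c = sc then specLoopA rest (i+1) (mask ||| (1 <<< (15 - i))) rem'
        else specLoopA rest (i+1) mask (sc :: rem')

theorem pvLoopA_eq_spec (xs : List Char) : ∀ (i mask si : Nat) (sl : List Char),
    (pvLoopA xs i mask si sl).1 = specLoopA xs i mask (sl.drop si) := by
  induction xs with
  | nil => intro i mask si sl; rfl
  | cons c rest ih =>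
    intro i mask si sl
    by_cases h16 : 16 ≤ i
    · simp only [pvLoopA, specLoopA, if_pos h16]
    · by_cases h : si < sl.length
      · have hd : sl.drop si = sl[si] :: sl.drop (si+1) := List.drop_eq_getElem_cons h
        rw [hd]
        by_cases hc : c = sl[si]
        · simp only [pvLoopA, specLoopA, if_neg h16, dif_pos h, if_pos hc]
          exact ih (i+1) _ (si+1) sl
        · simp only [pvLoopA, specLoopA, if_neg h16, dif_pos h, if_neg hc]
          rw [ih (i+1) mask si sl, hd]
      · have hd : sl.drop si = [] := by
          simp [List.drop_eq_nil_iff]; omega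
        rw [hd]
        simp only [pvLoopA, specLoopA, if_neg h16, dif_neg h]
        rw [ih (i+1) mask si sl, hd]

theorem specLoopA_nil (xs : List Char) : ∀ (i mask : Nat), specLoopA xs i mask [] = mask := by
  induction xs with
  | nil => intro i mask; rfl
  | cons c rest ih => intro i mask; by_cases h16 : 16 ≤ i <;> simp [specLoopA, h16, ih]

-- [a] is a prefix of u iff u starts with a.
theorem singleton_prefix_iff (a : Char) (u : List Char) :
    List.IsPrefix [a] u ↔ ∃ v, u = a :: v := by
  constructor
  · rintro ⟨t, rfl⟩; exact ⟨t, rfl⟩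
  · rintro ⟨v, rfl⟩; exact ⟨v, rfl⟩

-- [a] is an infix of u iff a occurs in u.
theorem singleton_infix_iff (a : Char) (u : List Char) :
    List.IsInfix [a] u ↔ a ∈ u := by
  constructor
  · intro h; exact (List.singleton_sublist).mp h.sublist
  · intro h
    induction u with
    | nil => cases h
    | cons b t ih =>
      rcases List.mem_cons.mp h with h | h
      · exact ⟨[], t, by simp [h]⟩
      · rcases ih h with ⟨u₁, u₂, hu⟩
        exact ⟨b :: u₁, u₂, by simp [← hu]⟩

-- How Python's single-character find behaves on a cons cell.
theorem find_single_cons (c sc : Char) (t : List Char) :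
    PySem.Chars.find (c :: t) [sc] =
      if c = sc then 0
      else if PySem.Chars.find t [sc] = -1 then -1 else 1 + PySem.Chars.find t [sc] := by
  by_cases hc : c = sc
  · subst hc
    have hpos : 0 ≤ PySem.Chars.find (c :: t) [c] :=
      (PySem.Chars.find_nonneg_iff _ _).mpr ((singleton_infix_iff _ _).mpr (List.mem_cons_self))
    have hspec := PySem.Chars.find_spec (s := c :: t) (sub := [c]) hpos
    have h0 : (PySem.Chars.find (c :: t) [c]).toNat = 0 := by
      by_contra hne
      exact hspec.2 0 (by omega) ⟨t, rfl⟩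
    rw [if_pos rfl]
    omega
  · rw [if_neg hc]
    by_cases hnone : PySem.Chars.find t [sc] = -1
    · have hni : ¬ List.IsInfix [sc] t := (PySem.Chars.find_eq_neg_one_iff _ _).mp hnone
      have hni' : ¬ List.IsInfix [sc] (c :: t) := by
        intro hin
        rcases List.mem_cons.mp ((singleton_infix_iff _ _).mp hin) with h | h
        · exact hc h.symm
        · exact hni ((singleton_infix_iff _ _).mpr h)
      rw [if_pos hnone]
      exact (PySem.Chars.find_eq_neg_one_iff _ _).mpr hni'
    · have hj : 0 ≤ PySem.Chars.find t [sc] := by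
        have := PySem.Chars.neg_one_le_find (s := t) (sub := [sc])
        omega
      have hspecT := PySem.Chars.find_spec (s := t) (sub := [sc]) hj
      have hmemT : sc ∈ t :=
        List.mem_of_mem_drop ((List.singleton_sublist).mp hspecT.1.sublist)
      have hf : 0 ≤ PySem.Chars.find (c :: t) [sc] :=
        (PySem.Chars.find_nonneg_iff _ _).mpr
          ((singleton_infix_iff _ _).mpr (List.mem_cons_of_mem _ hmemT))
      have hspecF := PySem.Chars.find_spec (s := c :: t) (sub := [sc]) hf
      have hf0 : (PySem.Chars.find (c :: t) [sc]).toNat ≠ 0 := by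
        intro h0
        have hp : List.IsPrefix [sc] (c :: t) := by
          have := hspecF.1
          rw [h0, List.drop_zero] at this
          exact this
        rcases (singleton_prefix_iff _ _).mp hp with ⟨v, hv⟩
        have h1 : c = sc ∧ t = v := by simpa using hv
        exact hc h1.1
      set fN := (PySem.Chars.find (c :: t) [sc]).toNat with hfN
      obtain ⟨m, hm⟩ : ∃ m, fN = m + 1 := ⟨fN - 1, by omega⟩
      have hdropF : (c :: t).drop fN = t.drop m := by rw [hm]; rfl
      have hprefM : List.IsPrefix [sc] (t.drop m) := by rw [← hdropF]; exact hspecF.1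
      have hge : (PySem.Chars.find t [sc]).toNat ≤ m := by
        by_contra hlt
        exact hspecT.2 m (by omega) hprefM
      have hle : m ≤ (PySem.Chars.find t [sc]).toNat := by
        by_contra hlt
        have hnp : ¬ List.IsPrefix [sc] ((c :: t).drop ((PySem.Chars.find t [sc]).toNat + 1)) :=
          hspecF.2 _ (by omega)
        exact hnp (by simpa using hspecT.1)
      rw [if_neg hnone]
      omega

-- Step lemmas for findFrom on a single-character needle, phrased at position k.
theorem findFrom_hit (label : String) (sc : Char) (k : Nat) (t : List Char)
    (hd : label.toList.drop k = sc :: t) :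
    PySem.Str.findFrom label (String.ofList [sc]) (k : Int) none = (k : Int) := by
  have hk : k ≤ label.toList.length := by
    by_contra h
    rw [List.drop_eq_nil_of_le (by omega)] at hd
    cases hd
  have hk' : k ≤ label.length := by simpa using hk
  rw [PySem.Str.findFrom_eq]
  rw [PySem.Chars.findFrom_natCast _ _ _ (by simpa using hk'), hd]
  simp [find_single_cons]

theorem findFrom_miss (label : String) (sc c : Char) (k : Nat) (t : List Char)
    (hd : label.toList.drop k = c :: t) (hc : c ≠ sc) :
    PySem.Str.findFrom label (String.ofList [sc]) (k : Int) none =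
      PySem.Str.findFrom label (String.ofList [sc]) ((k : Int) + 1) none := by
  have hk : k < label.toList.length := by
    by_contra h
    rw [List.drop_eq_nil_of_le (by omega)] at hd
    cases hd
  have ht : label.toList.drop (k + 1) = t := by
    rw [← List.tail_drop, hd]
    rfl
  have hcast : ((k : Int) + 1) = ((k + 1 : Nat) : Int) := by push_cast; ring
  rw [PySem.Str.findFrom_eq, PySem.Str.findFrom_eq, hcast]
  rw [PySem.Chars.findFrom_natCast _ _ _ (by simpa using Nat.le_of_lt hk),
      PySem.Chars.findFrom_natCast _ _ _ (by simpa using hk)]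
  rw [hd, ht]
  simp only [String.toList_ofList]
  rw [find_single_cons, if_neg hc]
  by_cases hnone : PySem.Chars.find t [sc] = -1
  · simp [hnone]
  · have hj : 0 ≤ PySem.Chars.find t [sc] := by
      have := PySem.Chars.neg_one_le_find (s := t) (sub := [sc])
      omega
    have h1 : ¬ (1 + PySem.Chars.find t [sc] = -1) := by omega
    simp only [if_neg hnone]
    rw [if_neg h1]
    push_cast
    ring

-- Main loop correspondence: A's scan from position k equals B's find-cursor loop at start k,
-- provided the remaining short characters form a subsequence of the rest of label[:16].
theorem loop_main (label : String) (xs : List Char) : ∀ (k mask : Nat) (rem : List Char),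
    xs = label.toList.drop k →
    List.Sublist rem ((label.toList.take 16).drop k) →
    specLoopA xs k mask rem = pvLoopB label rem (k : Int) mask := by
  induction xs with
  | nil =>
    intro k mask rem hxs hsub
    have hlen : label.toList.length ≤ k := by
      by_contra h
      have : label.toList.drop k ≠ [] := by rw [Ne, List.drop_eq_nil_iff]; omega
      exact this hxs.symm
    have hnil : (label.toList.take 16).drop k = [] := by
      apply List.drop_eq_nil_of_le
      calc (label.toList.take 16).length ≤ label.toList.length := by simp
        _ ≤ k := hlen
    rw [hnil] at hsub
    rw [List.sublist_nil.mp hsub]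
    rfl
  | cons c rest ih =>
    intro k mask rem hxs hsub
    cases rem with
    | nil => rw [specLoopA_nil]; rfl
    | cons sc rem' =>
      have hl : label.toList.length = label.length := by simp
      have hk16 : k < 16 := by
        by_contra h
        rw [List.drop_eq_nil_of_le (by simp; omega)] at hsub
        exact (List.cons_ne_nil _ _) (List.sublist_nil.mp hsub)
      have hklen : k < label.toList.length := by
        by_contra h
        rw [List.drop_eq_nil_of_le (by omega)] at hxs
        cases hxs
      have hrest : rest = label.toList.drop (k + 1) := by
        rw [← List.tail_drop, ← hxs]
        rfl
      have hck : label.toList[k] = c := by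
        have hdk := List.drop_eq_getElem_cons (l := label.toList) (i := k) hklen
        rw [← hxs] at hdk
        injection hdk with h1 _
        exact h1.symm
      have hdtake : (label.toList.take 16).drop k = c :: (label.toList.take 16).drop (k + 1) := by
        have hklen16 : k < (label.toList.take 16).length := by simp; omega
        rw [List.drop_eq_getElem_cons hklen16]
        congr 1
        simpa [hk16] using hck
      by_cases hc : c = sc
      · -- match: both set bit 15-k and advance
        subst hc
        have hfind := findFrom_hit label c k rest hxs.symm
        have hsub' : List.Sublist rem' ((label.toList.take 16).drop (k + 1)) := by
          rw [hdtake] at hsub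
          exact (List.cons_sublist_cons).mp hsub
        have hk0 : ¬ ((k : Int) = -1 ∨ 16 ≤ (k : Int)) := by
          rintro (h | h) <;> omega
        have hB : pvLoopB label (c :: rem') (k : Int) mask =
            pvLoopB label rem' ((k : Int) + 1) (mask ||| (1 <<< (15 - k))) := by
          rw [pvLoopB]
          simp only [hfind, if_neg hk0, Int.toNat_natCast]
        rw [hB]
        have hcast : ((k : Int) + 1) = ((k + 1 : Nat) : Int) := by push_cast; ring
        rw [hcast, ← ih (k + 1) (mask ||| (1 <<< (15 - k))) rem' hrest hsub']
        simp [specLoopA, Nat.not_le.mpr hk16]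
      · -- no match at k: A skips c, B's find skips it too
        have hsub' : List.Sublist (sc :: rem') ((label.toList.take 16).drop (k + 1)) := by
          rw [hdtake] at hsub
          cases hsub with
          | cons _ h => exact h
          | cons₂ _ h => exact absurd rfl hc
        have hfind := findFrom_miss label sc c k rest hxs.symm hc
        have hB : pvLoopB label (sc :: rem') (k : Int) mask =
            pvLoopB label (sc :: rem') ((k : Int) + 1) mask := by
          rw [pvLoopB, pvLoopB]
          simp only [hfind]
        rw [hB]
        have hcast : ((k : Int) + 1) = ((k + 1 : Nat) : Int) := by push_cast; ring
        rw [hcast, ← ih (k + 1) mask (sc :: rem') hrest hsub']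
        simp [specLoopA, Nat.not_le.mpr hk16, hc]

-- ===== VERDICT (by name: the statement is the Claim_ definition above) =====
theorem calculate_label_short_mask_spec : Claim_equal_calculate_label_short_mask := by
  intro label short_label _ hpre
  unfold Spec_calculate_label_short_mask
  unfold Pre_calculate_label_short_mask at hpre
  unfold calculate_label_short_mask calculate_label_short_mask_alt
  by_cases hempty : short_label = ""
  · subst hempty
    simp [pvLoopB]
  · rw [if_neg hempty]
    have h0 : (pvLoopA label.toList 0 0 0 short_label.toList).1 =
        specLoopA label.toList 0 0 (short_label.toList.drop 0) :=
      pvLoopA_eq_spec _ 0 0 0 _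
    rw [List.drop_zero] at h0
    have hmain := loop_main label label.toList 0 0 short_label.toList (by simp) (by simpa using hpre)
    simp only [Nat.cast_zero] at hmain
    rw [h0, hmain]
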